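-- pv_equiv track=rewrite | github.com/Nandish1212/preparation | sq_odd_even_diff.py | sqrt_odd_even_diff
-- ===== SOURCE A (Python) =====
-- def sqrt_odd_even_diff(m,n):
--     sum_even=0
--     sum_odd=0
--     for i in range(m,n+1):
--         if i%2==0:
--             sum_even+=pow(i,2)
--         else:
--             sum_odd+=pow(i,2)
--     return abs(sum_even-sum_odd)
-- ===== SOURCE B (Python) =====
-- def sqrt_odd_even_diff(m, n):
--     # Closed form: sum_even - sum_odd over m..n equals H(n) - H(m-1),
--     # where H(x) = (-1)^x * x*(x+1)//2 is the alternating prefix sum of squares.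
--     if m > n:
--         return 0
--     def H(x):
--         t = x * (x + 1) // 2
--         return t if x % 2 == 0 else -t
--     return abs(H(n) - H(m - 1))
-- ===== Notes on version B (the rewrite author's own statement) =====
-- stated objective: faster
-- what changed: Replaced the O(n-m) loop over the range by the closed-form alternating prefix sum H(x) = (-1)^x * x*(x+1)//2, so the answer is |H(n) - H(m-1)| computed in O(1).
import Mathlib
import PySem

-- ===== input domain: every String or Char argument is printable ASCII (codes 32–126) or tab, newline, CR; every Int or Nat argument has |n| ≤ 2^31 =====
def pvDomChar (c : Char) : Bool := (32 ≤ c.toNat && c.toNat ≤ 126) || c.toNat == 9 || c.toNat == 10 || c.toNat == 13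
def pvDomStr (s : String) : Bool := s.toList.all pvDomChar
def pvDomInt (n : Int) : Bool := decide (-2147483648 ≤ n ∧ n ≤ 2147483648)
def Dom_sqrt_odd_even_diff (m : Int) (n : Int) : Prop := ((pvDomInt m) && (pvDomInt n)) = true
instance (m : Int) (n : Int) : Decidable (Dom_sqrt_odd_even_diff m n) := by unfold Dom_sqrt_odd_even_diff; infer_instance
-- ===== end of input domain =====

-- B replaces A's O(n-m) accumulation loop by a closed-form O(1) formula (faster: asymptotic).

-- ===== PORT A =====
-- literal port of A's loop: fold over range(m, n+1) carrying (sum_even, sum_odd)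
def sqrt_odd_even_diff (m : Int) (n : Int) : Int :=
  let st := (PySem.List.pyRange m (n + 1) 1).foldl
    (fun (s : Int × Int) i =>
      if PySem.Int.mod i 2 == 0 then (s.1 + i ^ 2, s.2) else (s.1, s.2 + i ^ 2))
    (0, 0)
  |st.1 - st.2|

-- ===== PORT B =====
-- H(x) = (-1)^x * (x*(x+1)//2): alternating prefix sum of squares (Source B's helper H)
def pvH (x : Int) : Int :=
  let t := PySem.Int.floordiv (x * (x + 1)) 2
  if PySem.Int.mod x 2 == 0 then t else -t

def sqrt_odd_even_diff_alt (m : Int) (n : Int) : Int :=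
  if m > n then 0 else |pvH n - pvH (m - 1)|

-- ===== PRECONDITION & SPEC =====
def Spec_sqrt_odd_even_diff (m : Int) (n : Int) (out : Int) : Prop := out = sqrt_odd_even_diff_alt m n
instance (m : Int) (n : Int) (out : Int) : Decidable (Spec_sqrt_odd_even_diff m n out) := by unfold Spec_sqrt_odd_even_diff; infer_instance

-- ===== CLAIM (what is proved, stated in full; the proofs are below) =====
def Claim_equal_sqrt_odd_even_diff : Prop := ∀ (m : Int) (n : Int), Dom_sqrt_odd_even_diff m n → Spec_sqrt_odd_even_diff m n (sqrt_odd_even_diff m n)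

-- ===== LEMMAS AND PROOFS =====

-- signed square: +i² for even i, -i² for odd i
def pvG (i : Int) : Int := if PySem.Int.mod i 2 == 0 then i ^ 2 else -i ^ 2

-- A's fold tracks sum_even and sum_odd; their difference accumulates pvG
lemma pvFold_diff (l : List Int) (s : Int × Int) :
    (l.foldl (fun (s : Int × Int) i =>
      if PySem.Int.mod i 2 == 0 then (s.1 + i ^ 2, s.2) else (s.1, s.2 + i ^ 2)) s).1
    - (l.foldl (fun (s : Int × Int) i =>
      if PySem.Int.mod i 2 == 0 then (s.1 + i ^ 2, s.2) else (s.1, s.2 + i ^ 2)) s).2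
    = s.1 - s.2 + (l.map pvG).sum := by
  induction l generalizing s with
  | nil => simp
  | cons x xs ih =>
    rw [List.foldl_cons, ih]
    simp only [List.map_cons, List.sum_cons, pvG]
    by_cases h : PySem.Int.mod x 2 == 0
    · simp only [if_pos h]; ring
    · simp only [if_neg h]; ring

-- the closed form satisfies the recurrence H(x) = H(x-1) + pvG(x)
lemma pvH_succ (x : Int) : pvH x = pvH (x - 1) + pvG x := by
  have hm : ∀ a : Int, PySem.Int.mod a 2 = a % 2 :=
    fun a => PySem.Int.mod_eq_emod_of_pos (by norm_num)
  have hd : ∀ a : Int, PySem.Int.floordiv a 2 = a / 2 :=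
    fun a => PySem.Int.floordiv_eq_ediv_of_pos (by norm_num)
  rcases Int.even_or_odd x with ⟨k, hk⟩ | ⟨k, hk⟩
  · have h1 : x % 2 = 0 := by omega
    have h2 : (x - 1) % 2 = 1 := by omega
    have hq1 : x * (x + 1) / 2 = k * (2 * k + 1) := by
      rw [show x * (x + 1) = 2 * (k * (2 * k + 1)) from by subst hk; ring]
      exact Int.mul_ediv_cancel_left _ (by norm_num)
    have hq2 : (x - 1) * (x - 1 + 1) / 2 = k * (2 * k - 1) := by
      rw [show (x - 1) * (x - 1 + 1) = 2 * (k * (2 * k - 1)) from by subst hk; ring]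
      exact Int.mul_ediv_cancel_left _ (by norm_num)
    simp only [pvH, pvG, hm, hd, h1, h2, hq1, hq2]
    norm_num
    subst hk; ring
  · have h1 : x % 2 = 1 := by omega
    have h2 : (x - 1) % 2 = 0 := by omega
    have hq1 : x * (x + 1) / 2 = (2 * k + 1) * (k + 1) := by
      rw [show x * (x + 1) = 2 * ((2 * k + 1) * (k + 1)) from by subst hk; ring]
      exact Int.mul_ediv_cancel_left _ (by norm_num)
    have hq2 : (x - 1) * (x - 1 + 1) / 2 = k * (2 * k + 1) := by
      rw [show (x - 1) * (x - 1 + 1) = 2 * (k * (2 * k + 1)) from by subst hk; ring]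
      exact Int.mul_ediv_cancel_left _ (by norm_num)
    simp only [pvH, pvG, hm, hd, h1, h2, hq1, hq2]
    norm_num
    subst hk; ring

-- summing pvG over range(a, b) telescopes to H(b-1) - H(a-1)
lemma pvSum_range (a b : Int) (h : a ≤ b) :
    ((PySem.List.pyRange a b 1).map pvG).sum = pvH (b - 1) - pvH (a - 1) := by
  obtain ⟨k, hk⟩ : ∃ k : Nat, b = a + k := ⟨(b - a).toNat, by omega⟩
  subst hk
  induction k with
  | zero => simp
  | succ k ih =>
    have hk' : a ≤ a + (k : Int) := by omega
    have : a + ((k + 1 : Nat) : Int) = (a + k) + 1 := by push_cast; ring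
    rw [this, PySem.List.pyRange_one_succ_right hk']
    rw [List.map_append, List.sum_append, ih hk']
    have := pvH_succ (a + k)
    simp; omega

theorem pv_main (m n : Int) : sqrt_odd_even_diff m n = sqrt_odd_even_diff_alt m n := by
  unfold sqrt_odd_even_diff sqrt_odd_even_diff_alt
  by_cases h : m > n
  · rw [PySem.List.pyRange_one_eq_nil (by omega : n + 1 ≤ m)]
    simp [h]
  · have h' : m ≤ n + 1 := by omega
    have hd := pvFold_diff (PySem.List.pyRange m (n + 1) 1) (0, 0)
    have hs := pvSum_range m (n + 1) h'
    simp only [hd, hs]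
    simp [h]

-- ===== VERDICT (by name: the statement is the Claim_ definition above) =====
theorem sqrt_odd_even_diff_spec : Claim_equal_sqrt_odd_even_diff := by
  intro m n _
  exact pv_main m n
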